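-- pv_equiv track=rewrite | github.com/JayQuimby/SampleCode | BombBaby.py | solutionh
-- ===== SOURCE A (Python) =====
-- def solutionh(M, F, C):
--     if M == 1 and F ==1:
--         return str(C)
--     elif M == 0 or F == 0 or M == F:
--         return "impossible"
--     else:
--         if M > F:
--             if F == 1:
--                 return str(C+M-F)
--             elif M > F*2:
--                 return solutionh(F, M-int(M/F)*F, C+int(M/F))
--             else:
--                 return solutionh(F, M-F, C+1)
--         else:
--             return solutionh(F, M, C)
-- ===== SOURCE B (Python) =====
-- def solutionh(M, F, C):
--     a, b = max(M, F), min(M, F)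
--     steps = C
--     while True:
--         if a == 1 and b == 1:
--             return str(steps)
--         if b == 0 or a == b:
--             return "impossible"
--         if b == 1:
--             return str(steps + a - 1)
--         q, r = divmod(a, b)
--         steps += q
--         a, b = b, r
-- ===== Notes on version B (the rewrite author's own statement) =====
-- stated objective: simpler
-- what changed: Replaces A's tail recursion with its three-way branching (swap when M<F, subtract when F<M<=2F, quotient step when M>2F) by one iterative while-loop over (a,b)=(max(M,F),min(M,F)) that always takes a single divmod step.
import Mathlib
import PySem

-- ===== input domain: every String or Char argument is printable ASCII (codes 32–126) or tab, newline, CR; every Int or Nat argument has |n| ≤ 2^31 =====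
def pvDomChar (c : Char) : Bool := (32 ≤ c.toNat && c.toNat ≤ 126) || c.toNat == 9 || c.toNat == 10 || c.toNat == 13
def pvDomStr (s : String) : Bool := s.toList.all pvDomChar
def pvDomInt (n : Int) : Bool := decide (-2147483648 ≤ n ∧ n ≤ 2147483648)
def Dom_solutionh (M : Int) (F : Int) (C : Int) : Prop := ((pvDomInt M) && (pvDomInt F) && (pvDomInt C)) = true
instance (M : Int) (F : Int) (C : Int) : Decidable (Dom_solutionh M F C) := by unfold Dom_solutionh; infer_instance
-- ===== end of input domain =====

-- B replaces A's tail recursion (swap / subtract / quotient branches) by one iterative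
-- divmod loop over (max,min); objective: simpler. Equality of RETURN values is claimed on Pre_.

-- ===== PORT A =====
-- Transliteration of A with a fuel guard (Python A recurses forever outside Pre_);
-- the fuel is sufficient on Pre_ (proved below). int(M/F) is PySem.Int.truncdiv (exact for |n| ≤ 2^31 < 2^53).
def solutionhGo : Nat → Int → Int → Int → String
  | 0, _, _, _ => ""
  | fuel+1, M, F, C =>
    if M = 1 ∧ F = 1 then PySem.Int.toStr C
    else if M = 0 ∨ F = 0 ∨ M = F then "impossible"
    else if F < M then
      if F = 1 then PySem.Int.toStr (C + M - F)
      else if F * 2 < M then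
        solutionhGo fuel F (M - PySem.Int.truncdiv M F * F) (C + PySem.Int.truncdiv M F)
      else solutionhGo fuel F (M - F) (C + 1)
    else solutionhGo fuel F M C

def solutionh (M : Int) (F : Int) (C : Int) : String :=
  solutionhGo (2 * (M.toNat + F.toNat) + 2) M F C

-- ===== PORT B =====
-- used by the termination argument of solutionhLoop
theorem pymod_natAbs_lt (a b : Int) (hb : b ≠ 0) : (PySem.Int.mod a b).natAbs < b.natAbs := by
  rcases lt_or_gt_of_ne hb with h | h
  · have h1 := PySem.Int.mod_neg_bounds (a := a) h
    omega
  · have h1 := PySem.Int.mod_nonneg (a := a) h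
    have h2 := PySem.Int.mod_lt (a := a) h
    omega

-- transliteration of Source B's while-True loop (state (a, b, steps)); the loop itself terminates
def solutionhLoop (a : Int) (b : Int) (steps : Int) : String :=
  if a = 1 ∧ b = 1 then PySem.Int.toStr steps
  else if hz : b = 0 ∨ a = b then "impossible"
  else if b = 1 then PySem.Int.toStr (steps + a - 1)
  else solutionhLoop b (PySem.Int.mod a b) (steps + PySem.Int.floordiv a b)
termination_by b.natAbs
decreasing_by
  exact pymod_natAbs_lt a b (fun h => hz (Or.inl h))

def solutionh_alt (M : Int) (F : Int) (C : Int) : String :=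
  solutionhLoop (max M F) (min M F) C

-- ===== PRECONDITION & SPEC =====
-- Pre_ is exactly the set where Python A returns: on every other input A recurses forever
-- (RecursionError) — negatives (other than M=F, a zero, or the negative one dividing the
-- positive one) make A's Euclid-like subtraction cycle.
def Pre_solutionh (M : Int) (F : Int) (C : Int) : Prop :=
  (0 ≤ M ∧ 0 ≤ F) ∨ M = F ∨ M = 0 ∨ F = 0 ∨
  (M < 0 ∧ 0 < F ∧ PySem.Int.mod F M = 0) ∨ (F < 0 ∧ 0 < M ∧ PySem.Int.mod M F = 0)
instance (M : Int) (F : Int) (C : Int) : Decidable (Pre_solutionh M F C) := by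
  unfold Pre_solutionh; infer_instance

def pvWitness_solutionh : Int × Int × Int := (10, 4, 0)

def Spec_solutionh (M : Int) (F : Int) (C : Int) (out : String) : Prop := out = solutionh_alt M F C
instance (M : Int) (F : Int) (C : Int) (out : String) : Decidable (Spec_solutionh M F C out) := by
  unfold Spec_solutionh; infer_instance

-- ===== CLAIM (what is proved, stated in full; the proofs are below) =====
def Claim_equal_solutionh : Prop := ∀ (M : Int) (F : Int) (C : Int), Dom_solutionh M F C → Pre_solutionh M F C → Spec_solutionh M F C (solutionh M F C)


-- ===== LEMMAS AND PROOFS =====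

-- the core invariant: on nonnegative inputs A's fueled recursion equals B's loop on (max, min)
theorem go_eq_loop : ∀ fuel M F C, 0 ≤ M → 0 ≤ F →
    2 * (M.toNat + F.toNat) + (if M < F then 1 else 0) < fuel →
    solutionhGo fuel M F C = solutionhLoop (max M F) (min M F) C := by
  intro fuel
  induction fuel with
  | zero => intro M F C _ _ h; exact absurd h (Nat.not_lt_zero _)
  | succ f ih =>
    intro M F C hM hF hfuel
    by_cases h1 : M = 1 ∧ F = 1
    · obtain ⟨rfl, rfl⟩ := h1
      simp [solutionhGo]; rw [solutionhLoop]; simp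
    · by_cases h2 : M = 0 ∨ F = 0 ∨ M = F
      · have hA : solutionhGo (f+1) M F C = "impossible" := by
          simp only [solutionhGo]; rw [if_neg h1, if_pos h2]
        rw [hA]
        rcases h2 with h2 | h2 | h2
        · subst h2
          have hF' : (0:Int) ≤ F := hF
          rw [max_eq_right hF', min_eq_left hF']
          rw [solutionhLoop]
          simp
        · subst h2
          rw [max_eq_left hM, min_eq_right hM]
          rw [solutionhLoop]
          simp
        · subst h2
          rw [max_self, min_self, solutionhLoop]
          have hM1 : M ≠ 1 := fun h => h1 ⟨h, h⟩
          simp [hM1]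
      · push_neg at h2
        obtain ⟨hM0, hF0, hMF⟩ := h2
        by_cases h3 : F < M
        · -- M > F ≥ 1
          have hF1 : 1 ≤ F := by omega
          have hmax : max M F = M := max_eq_left (le_of_lt h3)
          have hmin : min M F = F := min_eq_right (le_of_lt h3)
          have hfuel' : 2 * (M.toNat + F.toNat) < f + 1 := by
            rw [if_neg (by omega)] at hfuel; exact hfuel
          by_cases h4 : F = 1
          · subst h4
            have hA : solutionhGo (f+1) M 1 C = PySem.Int.toStr (C + M - 1) := by
              simp [solutionhGo, hM0, hMF, h3]
            rw [hA, hmax, hmin, solutionhLoop]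
            rw [if_neg (fun h => h1 ⟨h.1, rfl⟩)]
            rw [dif_neg (by push_neg; exact ⟨by norm_num, hMF⟩)]
            rw [if_pos rfl]
          · -- F ≥ 2
            have hF2 : 2 ≤ F := by omega
            have hq : PySem.Int.truncdiv M F = PySem.Int.floordiv M F := by
              unfold PySem.Int.truncdiv
              rw [Int.tdiv_eq_ediv_of_nonneg hM, PySem.Int.floordiv_eq_ediv_of_pos (by omega)]
            have hmodeq : PySem.Int.mod M F = M - PySem.Int.floordiv M F * F := by
              have := PySem.Int.floordiv_mul_add_mod M F; omega
            have hRHS : solutionhLoop (max M F) (min M F) C =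
                solutionhLoop F (PySem.Int.mod M F) (C + PySem.Int.floordiv M F) := by
              rw [hmax, hmin, solutionhLoop]
              rw [if_neg (fun h => h4 h.2)]
              rw [dif_neg (by push_neg; exact ⟨hF0, hMF⟩)]
              rw [if_neg h4]
            by_cases h5 : F * 2 < M
            · have hA : solutionhGo (f+1) M F C =
                  solutionhGo f F (M - PySem.Int.truncdiv M F * F) (C + PySem.Int.truncdiv M F) := by
                simp only [solutionhGo]
                rw [if_neg h1, if_neg (by push_neg; exact ⟨hM0, hF0, hMF⟩), if_pos h3, if_neg h4,
                  if_pos h5]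
              have hr0 : 0 ≤ PySem.Int.mod M F := PySem.Int.mod_nonneg _ (by omega)
              have hrF : PySem.Int.mod M F < F := PySem.Int.mod_lt _ (by omega)
              rw [hA, hq, ← hmodeq, hRHS]
              rw [ih F (PySem.Int.mod M F) (C + PySem.Int.floordiv M F) (by omega) hr0 (by
                rw [if_neg (show ¬ F < PySem.Int.mod M F by omega)]
                omega)]
              rw [max_eq_left (le_of_lt hrF), min_eq_right (le_of_lt hrF)]
            · -- F < M ≤ 2F
              have hA : solutionhGo (f+1) M F C = solutionhGo f F (M - F) (C + 1) := by
                simp only [solutionhGo]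
                rw [if_neg h1, if_neg (by push_neg; exact ⟨hM0, hF0, hMF⟩), if_pos h3, if_neg h4,
                  if_neg h5]
              rw [hA, hRHS]
              by_cases h6 : M = F * 2
              · -- A reaches (F, F) and B reaches (F, 0): both "impossible"
                have hmod0 : PySem.Int.mod M F = 0 := by
                  rw [PySem.Int.mod_eq_zero_iff_dvd]; exact ⟨2, by omega⟩
                have hMF2 : M - F = F := by omega
                rw [hmod0, hMF2, solutionhLoop]
                rw [if_neg (fun h => h4 h.1), dif_pos (Or.inl rfl)]
                obtain ⟨f', rfl⟩ : ∃ f', f = f' + 1 := by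
                  refine ⟨f - 1, ?_⟩; omega
                simp [solutionhGo, h4]
              · have hfd : PySem.Int.floordiv M F = 1 := by
                  rw [PySem.Int.floordiv_eq_iff_of_pos (by omega)]
                  omega
                have hmd : PySem.Int.mod M F = M - F := by rw [hmodeq, hfd, one_mul]
                rw [hmd, hfd]
                rw [ih F (M - F) (C + 1) (by omega) (by omega) (by
                  rw [if_neg (show ¬ F < M - F by omega)]; omega)]
                rw [max_eq_left (by omega), min_eq_right (by omega)]
        · -- M < F : swap
          have h3' : M < F := by omega
          have hfuel'' : 2 * (M.toNat + F.toNat) + 1 < f + 1 := by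
            rw [if_pos (by omega)] at hfuel; exact hfuel
          have hA : solutionhGo (f+1) M F C = solutionhGo f F M C := by
            simp only [solutionhGo]
            rw [if_neg h1, if_neg (by push_neg; exact ⟨hM0, hF0, hMF⟩), if_neg h3]
          rw [hA, ih F M C hF hM (by rw [if_neg (show ¬ F < M by omega)]; omega)]
          rw [max_comm, min_comm]

-- B evaluates to "impossible" from state (b', 0) in one step (b' ≠ 1)
theorem loop_zero (b' s : Int) (hb : b' ≠ 1) : solutionhLoop b' 0 s = "impossible" := by
  rw [solutionhLoop]
  rw [if_neg (fun h => hb h.1), dif_pos (Or.inl rfl)]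

-- ===== VERDICT helper cases =====
theorem mixed_pos_neg (M F C : Int) (hF : F < 0) (hM : 0 < M) (hdvd : PySem.Int.mod M F = 0) :
    solutionh M F C = solutionh_alt M F C := by
  have hdvd' : F ∣ M := (PySem.Int.mod_eq_zero_iff_dvd M F).1 hdvd
  have htd : PySem.Int.truncdiv M F * F = M := by
    unfold PySem.Int.truncdiv
    exact Int.tdiv_mul_cancel hdvd'
  unfold solutionh solutionh_alt
  obtain ⟨f, hf⟩ : ∃ f, 2 * (M.toNat + F.toNat) + 2 = f + 2 := ⟨2 * (M.toNat + F.toNat), rfl⟩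
  rw [hf]
  show solutionhGo (f + 1 + 1) M F C = _
  simp only [solutionhGo]
  rw [if_neg (by rintro ⟨_, h⟩; omega), if_neg (by push_neg; exact ⟨by omega, by omega, by omega⟩),
    if_pos (by omega), if_neg (by omega), if_pos (by omega), htd]
  simp [solutionhGo]
  rw [max_eq_left (by omega), min_eq_right (by omega), solutionhLoop]
  rw [if_neg (by rintro ⟨_, h⟩; omega), dif_neg (by push_neg; exact ⟨by omega, by omega⟩),
    if_neg (by omega), hdvd, loop_zero _ _ (by omega)]

theorem mixed_neg_pos (M F C : Int) (hM : M < 0) (hF : 0 < F) (hdvd : PySem.Int.mod F M = 0) :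
    solutionh M F C = solutionh_alt M F C := by
  have hdvd' : M ∣ F := (PySem.Int.mod_eq_zero_iff_dvd F M).1 hdvd
  have htd : PySem.Int.truncdiv F M * M = F := by
    unfold PySem.Int.truncdiv
    exact Int.tdiv_mul_cancel hdvd'
  unfold solutionh solutionh_alt
  obtain ⟨f, hf⟩ : ∃ f, 2 * (M.toNat + F.toNat) + 2 = f + 3 := by
    refine ⟨2 * (M.toNat + F.toNat) - 1, by omega⟩
  rw [hf]
  show solutionhGo (f + 2 + 1) M F C = _
  simp only [solutionhGo]
  rw [if_neg (by rintro ⟨h, _⟩; omega), if_neg (by push_neg; exact ⟨by omega, by omega, by omega⟩),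
    if_neg (by omega)]
  show solutionhGo (f + 1 + 1) F M C = _
  simp only [solutionhGo]
  rw [if_neg (by rintro ⟨_, h⟩; omega), if_neg (by push_neg; exact ⟨by omega, by omega, by omega⟩),
    if_pos (by omega), if_neg (by omega), if_pos (by omega), htd]
  simp [solutionhGo]
  rw [max_eq_right (by omega), min_eq_left (by omega), solutionhLoop]
  rw [if_neg (by rintro ⟨_, h⟩; omega), dif_neg (by push_neg; exact ⟨by omega, by omega⟩),
    if_neg (by omega), hdvd, loop_zero _ _ (by omega)]

theorem zero_left (F C : Int) (hF : F < 0) : solutionh 0 F C = solutionh_alt 0 F C := by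
  unfold solutionh solutionh_alt
  obtain ⟨f, hf⟩ : ∃ f, 2 * ((0:Int).toNat + F.toNat) + 2 = f + 1 := ⟨2 * ((0:Int).toNat + F.toNat) + 1, rfl⟩
  rw [hf]
  simp only [solutionhGo]
  rw [if_pos (Or.inl trivial)]
  rw [max_eq_left (by omega), min_eq_right (by omega), solutionhLoop]
  rw [if_neg (by rintro ⟨h, _⟩; exact absurd h (by norm_num)),
    dif_neg (by push_neg; exact ⟨by omega, by omega⟩), if_neg (by omega)]
  have h0 : PySem.Int.mod 0 F = 0 := by
    rw [PySem.Int.mod_eq_zero_iff_dvd]; exact ⟨0, by ring⟩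
  rw [h0, loop_zero _ _ (by omega)]
  rw [if_neg (show ¬ F = 1 by omega)]

theorem zero_right (M C : Int) (hM : M < 0) : solutionh M 0 C = solutionh_alt M 0 C := by
  unfold solutionh solutionh_alt
  obtain ⟨f, hf⟩ : ∃ f, 2 * (M.toNat + (0:Int).toNat) + 2 = f + 1 := ⟨2 * (M.toNat + (0:Int).toNat) + 1, rfl⟩
  rw [hf]
  simp only [solutionhGo]
  rw [if_pos (Or.inr (Or.inl trivial))]
  rw [max_eq_right (by omega), min_eq_left (by omega), solutionhLoop]
  rw [if_neg (by rintro ⟨_, h⟩; omega),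
    dif_neg (by push_neg; exact ⟨by omega, by omega⟩), if_neg (by omega)]
  have h0 : PySem.Int.mod 0 M = 0 := by
    rw [PySem.Int.mod_eq_zero_iff_dvd]; exact ⟨0, by ring⟩
  rw [h0, loop_zero _ _ (by omega)]
  rw [if_neg (show ¬ M = 1 by omega)]

theorem diag (M C : Int) (hM : M < 0) : solutionh M M C = solutionh_alt M M C := by
  unfold solutionh solutionh_alt
  obtain ⟨f, hf⟩ : ∃ f, 2 * (M.toNat + M.toNat) + 2 = f + 1 := ⟨2 * (M.toNat + M.toNat) + 1, rfl⟩
  rw [hf]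
  simp only [solutionhGo]
  rw [if_pos (Or.inr (Or.inr trivial))]
  rw [max_self, min_self, solutionhLoop]
  rw [if_neg (by rintro ⟨h, _⟩; omega), dif_pos (Or.inr rfl)]
  rw [if_neg (show ¬ (M = 1 ∧ M = 1) by rintro ⟨h, _⟩; omega)]

-- ===== VERDICT (by name: the statement is the Claim_ definition above) =====
theorem solutionh_spec : Claim_equal_solutionh := by
  intro M F C _ hpre
  unfold Spec_solutionh
  by_cases hnn : 0 ≤ M ∧ 0 ≤ F
  · unfold solutionh solutionh_alt
    exact go_eq_loop _ M F C hnn.1 hnn.2 (by split_ifs <;> omega)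
  · rcases hpre with h | h | h | h | h | h
    · exact absurd h hnn
    · subst h; exact diag M C (by omega)
    · subst h; exact zero_left F C (by omega)
    · subst h; exact zero_right M C (by omega)
    · exact mixed_neg_pos M F C h.1 h.2.1 h.2.2
    · exact mixed_pos_neg M F C h.1 h.2.1 h.2.2
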